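-- pv_equiv track=rewrite | github.com/g1tsys/coding | Day 2 - Score 200/521-max_grid_area.py | max_grid_area
-- ===== SOURCE A (Python) =====
-- def max_grid_area(grid):
--     m = len(grid)  # 网格的行数
--     n = len(grid[0])  # 网格的列数
--
--     max_area = 0  # 最大活动区域的网格点数目
--
--     # 创建一个与网格大小相同的二维数组，用于记录已访问的网格
--     visited = [[False] * n for _ in range(m)]
--
--     # 遍历网格的每个位置作为起点
--     for i in range(m):
--         for j in range(n):
--             if not visited[i][j]:
--                 area = dfs(grid, i, j, visited)  # 深度优先搜索计算当前起点的活动区域的网格点数目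
--                 max_area = max(max_area, area)  # 更新最大活动区域的网格点数目
--
--     return max_area
--
-- def dfs(grid, i, j, visited):
--     m, n = len(grid), len(grid[0])
--     area = 1  # 活动区域的网格点数目，初始为1
--     visited[i][j] = True  # 将当前网格标记为已访问
--
--     # 定义上下左右四个方向的偏移量
--     directions = [(0, -1), (0, 1), (-1, 0), (1, 0)]
--
--     # 深度优先搜索
--     for dx, dy in directions:
--         nx, ny = i + dx, j + dy
--         if 0 <= nx < m and 0 <= ny < n and not visited[nx][ny] and abs(grid[nx][ny] - grid[i][j]) <= 1:
--             # 如果相邻网格满足条件（编号差值的绝对值小于等于1），则继续搜索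
--             area += dfs(grid, nx, ny, visited)
--
--     return area
-- ===== SOURCE B (Python) =====
-- def max_grid_area(grid):
--     m = len(grid)
--     n = len(grid[0])
--     visited = [[False] * n for _ in range(m)]
--     best = 0
--     for i in range(m):
--         for j in range(n):
--             if not visited[i][j]:
--                 comp = {(i, j)}
--                 visited[i][j] = True
--                 changed = True
--                 while changed:
--                     changed = False
--                     for x in range(m):
--                         for y in range(n):
--                             if not visited[x][y] and any(
--                                 0 <= x + dx < m and 0 <= y + dy < n
--                                 and (x + dx, y + dy) in comp
--                                 and abs(grid[x][y] - grid[x + dx][y + dy]) <= 1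
--                                 for dx, dy in ((0, -1), (0, 1), (-1, 0), (1, 0))
--                             ):
--                                 visited[x][y] = True
--                                 comp.add((x, y))
--                                 changed = True
--                 if len(comp) > best:
--                     best = len(comp)
--     return best
-- ===== Notes on version B (the rewrite author's own statement) =====
-- stated objective: alternative
-- what changed: Replaces the recursive DFS helper (per-call area accumulation through a shared visited matrix) by a frontier-free saturation: for each unvisited start it grows a component set by repeatedly sweeping the whole grid and adding any unvisited cell adjacent (|diff| <= 1) to the current set until a full sweep adds nothing, then takes the set's size.
import Mathlib
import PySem

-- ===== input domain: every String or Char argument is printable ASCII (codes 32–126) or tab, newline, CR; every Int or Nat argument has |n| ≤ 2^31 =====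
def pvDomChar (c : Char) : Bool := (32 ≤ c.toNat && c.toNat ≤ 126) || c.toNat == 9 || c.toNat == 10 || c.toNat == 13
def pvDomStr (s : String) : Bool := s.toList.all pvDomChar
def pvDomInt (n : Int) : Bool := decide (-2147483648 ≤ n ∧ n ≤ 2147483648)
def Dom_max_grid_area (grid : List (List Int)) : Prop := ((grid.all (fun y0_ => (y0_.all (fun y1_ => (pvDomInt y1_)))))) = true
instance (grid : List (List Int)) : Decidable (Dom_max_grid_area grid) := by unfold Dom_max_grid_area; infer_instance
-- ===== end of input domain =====

-- B replaces A's recursive DFS by a frontier-free saturation (repeated whole-grid sweeps that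
-- absorb any unvisited cell adjacent to the growing component set); alternative decomposition.

-- ===== PORT A =====
-- shared tiny accessors: grid[i][j], visited[i][j], visited[i][j] = True (out of range reads default; inside Pre_ all reads are in range)
def gget (grid : List (List Int)) (i j : Nat) : Int := (grid.getD i []).getD j 0
def vget (v : List (List Bool)) (i j : Nat) : Bool := (v.getD i []).getD j false
def vset (v : List (List Bool)) (i j : Nat) : List (List Bool) := v.set i ((v.getD i []).set j true)

-- the four direction offsets both Pythons write as literal tuples
def dirs4 : List (Int × Int) := [((0 : Int), (-1 : Int)), (0, 1), (-1, 0), (1, 0)]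

-- one direction step of A's dfs loop body (rec = the recursive dfs call one fuel level down)
def dfsStep (grid : List (List Int)) (rec : Nat → Nat → List (List Bool) → List (List Bool) × Int)
    (i j : Nat) (st : List (List Bool) × Int) (d : Int × Int) : List (List Bool) × Int :=
  let m := grid.length
  let n := (grid.headD []).length
  let nx : Int := (i : Int) + d.1
  let ny : Int := (j : Int) + d.2
  if 0 ≤ nx ∧ nx < (m : Int) ∧ 0 ≤ ny ∧ ny < (n : Int) then
    if vget st.1 nx.toNat ny.toNat = false ∧ (gget grid nx.toNat ny.toNat - gget grid i j).natAbs ≤ 1 then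
      let p := rec nx.toNat ny.toNat st.1
      (p.1, st.2 + p.2)
    else st
  else st

-- A's dfs; fuel m*n+1 always suffices (each call marks a fresh cell)
def dfsA (grid : List (List Int)) : Nat → Nat → Nat → List (List Bool) → List (List Bool) × Int
  | 0, _, _, v => (v, 0)
  | fuel + 1, i, j, v =>
    dirs4.foldl (dfsStep grid (dfsA grid fuel) i j) (vset v i j, 1)

def max_grid_area (grid : List (List Int)) : Int :=
  let m := grid.length
  let n := (grid.headD []).length
  let st := (List.range m).foldl (fun st i =>
      (List.range n).foldl (fun (st : List (List Bool) × Int) j =>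
        if vget st.1 i j = false then
          let p := dfsA grid (m * n + 1) i j st.1
          (p.1, max st.2 p.2)
        else st) st) (List.replicate m (List.replicate n false), 0)
  st.2

-- ===== PORT B =====
-- B's any(...): is some in-bounds neighbour of (x,y) in the component set with |diff| ≤ 1?
def addable (grid : List (List Int)) (comp : List (Nat × Nat)) (x y : Nat) : Bool :=
  dirs4.any fun d =>
    decide (0 ≤ (x : Int) + d.1 ∧ (x : Int) + d.1 < (grid.length : Int) ∧
            0 ≤ (y : Int) + d.2 ∧ (y : Int) + d.2 < ((grid.headD []).length : Int)) &&
    decide (((((x : Int) + d.1).toNat, ((y : Int) + d.2).toNat) : Nat × Nat) ∈ comp) &&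
    decide ((gget grid x y - gget grid (((x : Int) + d.1).toNat) (((y : Int) + d.2).toNat)).natAbs ≤ 1)

-- B's sweep body at one cell: absorb it into the component if unvisited and adjacent to it
def sweepCell (grid : List (List Int)) (st : List (Nat × Nat) × List (List Bool) × Bool)
    (x y : Nat) : List (Nat × Nat) × List (List Bool) × Bool :=
  if vget st.2.1 x y = false ∧ addable grid st.1 x y = true then
    ((x, y) :: st.1, vset st.2.1 x y, true)
  else st

-- B's 'while changed' loop: sweep the whole grid until a sweep adds nothing (fuel m*n+1 suffices)
-- one full sweep over the grid (B's two nested for-loops inside the while body)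
def sweepB (grid : List (List Int)) (comp : List (Nat × Nat)) (v : List (List Bool)) :
    List (Nat × Nat) × List (List Bool) × Bool :=
  (List.range grid.length).foldl (fun st x =>
      (List.range (grid.headD []).length).foldl (fun st y => sweepCell grid st x y) st)
    (comp, v, false)

def saturate (grid : List (List Int)) : Nat → List (Nat × Nat) → List (List Bool) →
    List (Nat × Nat) × List (List Bool)
  | 0, comp, v => (comp, v)
  | fuel + 1, comp, v =>
    let st := sweepB grid comp v
    if st.2.2 then saturate grid fuel st.1 st.2.1 else (st.1, st.2.1)

def max_grid_area_alt (grid : List (List Int)) : Int :=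
  let m := grid.length
  let n := (grid.headD []).length
  let st := (List.range m).foldl (fun st i =>
      (List.range n).foldl (fun (st : List (List Bool) × Int) j =>
        if vget st.1 i j = false then
          let p := saturate grid (m * n + 1) [(i, j)] (vset st.1 i j)
          (p.2, if st.2 < (p.1.length : Int) then (p.1.length : Int) else st.2)
        else st) st) (List.replicate m (List.replicate n false), 0)
  st.2

-- ===== PRECONDITION & SPEC =====
-- Pre_ excludes exactly the inputs where Python A raises IndexError: the empty grid (grid[0]),
-- and ragged grids with a row shorter than the first row (grid[nx][ny] with ny < n).
def Pre_max_grid_area (grid : List (List Int)) : Prop :=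
  grid ≠ [] ∧ ∀ row ∈ grid, (grid.headD []).length ≤ row.length

instance (grid : List (List Int)) : Decidable (Pre_max_grid_area grid) := by
  unfold Pre_max_grid_area; infer_instance

def pvWitness_max_grid_area : List (List Int) := [[1, 2], [5, 2]]

def Spec_max_grid_area (grid : List (List Int)) (out : Int) : Prop := out = max_grid_area_alt grid
instance (grid : List (List Int)) (out : Int) : Decidable (Spec_max_grid_area grid out) := by
  unfold Spec_max_grid_area; infer_instance

-- ===== CLAIM (what is proved, stated in full; the proofs are below) =====
def Claim_equal_max_grid_area : Prop := ∀ (grid : List (List Int)), Dom_max_grid_area grid → Pre_max_grid_area grid → Spec_max_grid_area grid (max_grid_area grid)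


-- ===== LEMMAS AND PROOFS =====

-- visited matrices: shape, pointwise order, count of unvisited cells
def ShapeV (v : List (List Bool)) (m n : Nat) : Prop :=
  v.length = m ∧ ∀ k, k < m → (v[k]?.getD []).length = n

def subV (u w : List (List Bool)) : Prop :=
  ∀ a b, vget u a b = true → vget w a b = true

def cF : List (List Bool) → Nat
  | [] => 0
  | r :: t => r.count false + cF t

lemma vget_eq (v : List (List Bool)) (a b : Nat) :
    vget v a b = (v[a]?.getD [])[b]?.getD false := by
  simp [vget, List.getD_eq_getElem?_getD]

lemma vset_eq (v : List (List Bool)) (i j : Nat) :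
    vset v i j = v.set i ((v[i]?.getD []).set j true) := by
  simp [vset, List.getD_eq_getElem?_getD]

lemma vget_cons_zero (r : List Bool) (t : List (List Bool)) (b : Nat) :
    vget (r :: t) 0 b = r[b]?.getD false := by simp [vget_eq]

lemma vget_cons_succ (r : List Bool) (t : List (List Bool)) (a b : Nat) :
    vget (r :: t) (a + 1) b = vget t a b := by simp [vget_eq]

lemma shape_cons {r : List Bool} {t : List (List Bool)} {m n : Nat}
    (h : ShapeV (r :: t) (m + 1) n) : r.length = n ∧ ShapeV t m n := by
  refine ⟨by have := h.2 0 (Nat.succ_pos m); simpa using this, by simpa using h.1, ?_⟩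
  intro k hk
  have := h.2 (k + 1) (by omega)
  simpa using this

lemma vget_vset (v : List (List Bool)) (i j a b : Nat) :
    vget (vset v i j) a b =
      if a = i ∧ b = j ∧ i < v.length ∧ j < (v[i]?.getD []).length then true
      else vget v a b := by
  simp only [vget_eq, vset_eq, List.getElem?_set]
  by_cases hai : i = a
  · subst hai
    by_cases hlen : i < v.length
    · simp only [if_pos rfl, if_pos hlen, Option.getD_some, List.getElem?_set]
      by_cases hbj : j = b
      · subst hbj
        by_cases hjr : j < (v[i]?.getD []).length
        · have hjr' : j < v[i].length := by
            rw [List.getElem?_eq_getElem hlen] at hjr; simpa using hjr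
          simp [List.getElem?_set, hlen, hjr']
        · have hjr' : ¬ j < v[i].length := by
            rw [List.getElem?_eq_getElem hlen] at hjr; simpa using hjr
          have hnone : v[i][j]? = none := List.getElem?_eq_none (by omega)
          simp [List.getElem?_set, hlen, hjr', hnone]
      · have hne : ¬ b = j := fun h => hbj h.symm
        simp [hbj, hne]
    · have hvi : v[i]? = none := List.getElem?_eq_none (by omega)
      simp [hlen, hvi]
  · have hne : ¬ a = i := fun h => hai h.symm
    simp [hai, hne]

lemma vget_vset' {v : List (List Bool)} {m n i j : Nat} (hsh : ShapeV v m n)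
    (hi : i < m) (hj : j < n) (a b : Nat) :
    vget (vset v i j) a b = if a = i ∧ b = j then true else vget v a b := by
  rw [vget_vset]
  have h1 : i < v.length := hsh.1 ▸ hi
  have h2 : j < (v[i]?.getD []).length := by rw [hsh.2 i hi]; exact hj
  by_cases h : a = i ∧ b = j
  · rw [if_pos ⟨h.1, h.2, h1, h2⟩, if_pos h]
  · have : ¬(a = i ∧ b = j ∧ i < v.length ∧ j < (v[i]?.getD []).length) := by
      intro ⟨x, y, _⟩; exact h ⟨x, y⟩
    rw [if_neg this, if_neg h]

lemma vget_vset_self {v : List (List Bool)} {m n i j : Nat} (hsh : ShapeV v m n)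
    (hi : i < m) (hj : j < n) : vget (vset v i j) i j = true := by
  rw [vget_vset' hsh hi hj]; simp

lemma subV_vset (v : List (List Bool)) (i j : Nat) : subV v (vset v i j) := by
  intro a b h
  rw [vget_vset]
  split <;> simp [h]

lemma subV_refl (v : List (List Bool)) : subV v v := fun _ _ h => h

lemma subV_trans {u v w : List (List Bool)} (h1 : subV u v) (h2 : subV v w) :
    subV u w := fun a b h => h2 a b (h1 a b h)

lemma subV_false {u w : List (List Bool)} (h : subV u w) {a b : Nat}
    (hw : vget w a b = false) : vget u a b = false := by
  cases hu : vget u a b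
  · rfl
  · rw [h a b hu] at hw; exact hw.symm ▸ rfl

lemma shape_vset {v : List (List Bool)} {m n : Nat} (hsh : ShapeV v m n)
    (i j : Nat) : ShapeV (vset v i j) m n := by
  refine ⟨by simp [vset_eq, hsh.1], ?_⟩
  intro k hk
  rw [vset_eq, List.getElem?_set]
  by_cases hik : i = k
  · subst hik
    by_cases hlen : i < v.length
    · simp only [if_pos, if_pos hlen, Option.getD_some, List.length_set]
      exact hsh.2 i hk
    · exact absurd (hsh.1 ▸ hk) hlen
  · simp only [if_neg hik]
    exact hsh.2 k hk

lemma count_false_set_true :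
    ∀ (r : List Bool) (j : Nat), r[j]?.getD false = false → j < r.length →
      (r.set j true).count false + 1 = r.count false := by
  intro r
  induction r with
  | nil => intro j _ h; simp at h
  | cons b t ih =>
    intro j hf hj
    cases j with
    | zero =>
      simp only [List.getElem?_cons_zero, Option.getD_some] at hf
      simp [List.count_cons, hf]
    | succ j =>
      simp only [List.getElem?_cons_succ] at hf
      simp only [List.length_cons, Nat.add_lt_add_iff_right] at hj
      simp only [List.set_cons_succ, List.count_cons]
      have := ih j hf hj
      omega

lemma cF_vset :
    ∀ (v : List (List Bool)) (i : Nat) (j : Nat), i < v.length → vget v i j = false →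
      j < (v[i]?.getD []).length → cF (vset v i j) + 1 = cF v := by
  intro v
  induction v with
  | nil => intro i j h; simp at h
  | cons r t ih =>
    intro i j hi hv hj
    cases i with
    | zero =>
      simp only [List.getElem?_cons_zero, Option.getD_some] at hj
      rw [vget_cons_zero] at hv
      rw [vset_eq]
      simp only [List.getElem?_cons_zero, Option.getD_some, List.set_cons_zero, cF]
      have := count_false_set_true r j hv hj
      omega
    | succ i =>
      simp only [List.length_cons, Nat.add_lt_add_iff_right] at hi
      rw [vget_cons_succ] at hv
      simp only [List.getElem?_cons_succ] at hj
      rw [vset_eq]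
      simp only [List.getElem?_cons_succ, List.set_cons_succ, cF]
      have := ih i j hi hv hj
      rw [vset_eq] at this
      omega

lemma cF_le :
    ∀ (m : Nat) (v : List (List Bool)) (n : Nat), ShapeV v m n → cF v ≤ m * n := by
  intro m
  induction m with
  | zero =>
    intro v n hv
    have : v = [] := List.eq_nil_of_length_eq_zero hv.1
    simp [this, cF]
  | succ m ih =>
    intro v n hv
    cases v with
    | nil => simp [ShapeV] at hv
    | cons r t =>
      obtain ⟨hr, ht⟩ := shape_cons hv
      simp only [cF]
      have h1 : r.count false ≤ n := hr ▸ List.count_le_length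
      have h2 := ih t n ht
      have h3 : (m + 1) * n = m * n + n := by ring
      omega

lemma cF_pos :
    ∀ (v : List (List Bool)) (i j : Nat), i < v.length → vget v i j = false →
      j < (v[i]?.getD []).length → 1 ≤ cF v := by
  intro v
  induction v with
  | nil => intro i j h; simp at h
  | cons r t ih =>
    intro i j hi hv hj
    cases i with
    | zero =>
      simp only [List.getElem?_cons_zero, Option.getD_some] at hj
      rw [vget_cons_zero] at hv
      rw [List.getElem?_eq_getElem hj] at hv
      simp only [Option.getD_some] at hv
      have : false ∈ r := hv ▸ List.getElem_mem hj
      have := List.one_le_count_iff.mpr this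
      simp only [cF]
      omega
    | succ i =>
      simp only [List.length_cons, Nat.add_lt_add_iff_right] at hi
      rw [vget_cons_succ] at hv
      simp only [List.getElem?_cons_succ] at hj
      have := ih i j hi hv hj
      simp only [cF]
      omega

lemma ext2 :
    ∀ (m : Nat) (u w : List (List Bool)) (n : Nat), ShapeV u m n → ShapeV w m n →
      (∀ a b, a < m → b < n → vget u a b = vget w a b) → u = w := by
  intro m
  induction m with
  | zero =>
    intro u w n hu hw _
    have h1 : u = [] := List.eq_nil_of_length_eq_zero hu.1
    have h2 : w = [] := List.eq_nil_of_length_eq_zero hw.1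
    rw [h1, h2]
  | succ m ih =>
    intro u w n hu hw hp
    cases u with
    | nil => simp [ShapeV] at hu
    | cons ru ut =>
      cases w with
      | nil => simp [ShapeV] at hw
      | cons rw_ wt =>
        obtain ⟨hru, hut⟩ := shape_cons hu
        obtain ⟨hrw, hwt⟩ := shape_cons hw
        have hhead : ru = rw_ := by
          apply List.ext_getElem (hru.trans hrw.symm)
          intro b hb hb'
          have := hp 0 b (Nat.succ_pos m) (hru ▸ hb)
          rw [vget_cons_zero, vget_cons_zero] at this
          rw [List.getElem?_eq_getElem hb, List.getElem?_eq_getElem hb'] at this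
          simpa using this
        have htail := ih ut wt n hut hwt (fun a b ha hb => by
          have := hp (a + 1) b (by omega) hb
          rw [vget_cons_succ, vget_cons_succ] at this
          exact this)
        rw [hhead, htail]

lemma count_false_le :
    ∀ (u w : List Bool), u.length = w.length →
      (∀ b : Nat, u[b]?.getD false = true → w[b]?.getD false = true) →
      w.count false ≤ u.count false := by
  intro u
  induction u with
  | nil =>
    intro w hl _
    cases w
    · simp
    · simp at hl
  | cons a t ih =>
    intro w hl h
    cases w with
    | nil => simp at hl
    | cons b s =>
      simp only [List.length_cons, Nat.add_right_cancel_iff] at hl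
      have htail := ih s hl (fun k hk => by
        have := h (k + 1)
        simp only [List.getElem?_cons_succ] at this
        exact this hk)
      have hhead : a = true → b = true := by
        have := h 0
        simpa using this
      simp only [List.count_cons]
      cases a
      · cases b <;> simp <;> omega
      · have hb : b = true := hhead rfl
        subst hb
        simp
        omega


lemma cF_mono :
    ∀ (m : Nat) (u w : List (List Bool)) (n : Nat), ShapeV u m n → ShapeV w m n →
      subV u w → cF w ≤ cF u := by
  intro m
  induction m with
  | zero =>
    intro u w n hu hw _
    have h1 : u = [] := List.eq_nil_of_length_eq_zero hu.1
    have h2 : w = [] := List.eq_nil_of_length_eq_zero hw.1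
    rw [h1, h2]
  | succ m ih =>
    intro u w n hu hw hsub
    cases u with
    | nil => simp [ShapeV] at hu
    | cons ru ut =>
      cases w with
      | nil => simp [ShapeV] at hw
      | cons rw_ wt =>
        obtain ⟨hru, hut⟩ := shape_cons hu
        obtain ⟨hrw, hwt⟩ := shape_cons hw
        simp only [cF]
        have hhead : rw_.count false ≤ ru.count false := by
          apply count_false_le _ _ (hru.trans hrw.symm)
          intro b hb
          have := hsub 0 b (by rw [vget_cons_zero]; exact hb)
          rw [vget_cons_zero] at this
          exact this
        have htail := ih ut wt n hut hwt (fun a b h => by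
          have := hsub (a + 1) b (by rw [vget_cons_succ]; exact h)
          rw [vget_cons_succ] at this
          exact this)
        omega


-- the adjacency / reachability spec shared by both programs
def InB (g : List (List Int)) (c : Nat × Nat) : Prop :=
  c.1 < g.length ∧ c.2 < (g.headD []).length

def Adjc (g : List (List Int)) (c d : Nat × Nat) : Prop :=
  InB g d ∧ ((c.1 = d.1 ∧ (c.2 = d.2 + 1 ∨ d.2 = c.2 + 1)) ∨
             (c.2 = d.2 ∧ (c.1 = d.1 + 1 ∨ d.1 = c.1 + 1)))

def Elig (g : List (List Int)) (c d : Nat × Nat) : Prop :=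
  Adjc g c d ∧ (gget g d.1 d.2 - gget g c.1 c.2).natAbs ≤ 1

def StepR (g : List (List Int)) (V : List (List Bool)) (c d : Nat × Nat) : Prop :=
  Elig g c d ∧ vget V d.1 d.2 = false

def Reach (g : List (List Int)) (V : List (List Bool)) (x c : Nat × Nat) : Prop :=
  Relation.ReflTransGen (StepR g V) x c

lemma adj_of_dir (g : List (List Int)) {d : Int × Int} (hd : d ∈ dirs4) (i j : Nat)
    (h1 : 0 ≤ (i : Int) + d.1) (h2 : (i : Int) + d.1 < (g.length : Int))
    (h3 : 0 ≤ (j : Int) + d.2) (h4 : (j : Int) + d.2 < ((g.headD []).length : Int)) :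
    Adjc g (i, j) (((i : Int) + d.1).toNat, ((j : Int) + d.2).toNat) := by
  simp only [dirs4, List.mem_cons, List.not_mem_nil, or_false] at hd
  rcases hd with rfl | rfl | rfl | rfl <;>
    · simp only [Adjc, InB] at *
      omega

lemma dir_of_adj (g : List (List Int)) (x c : Nat × Nat) (h : Adjc g x c) :
    ∃ d ∈ dirs4, (c.1 : Int) = (x.1 : Int) + d.1 ∧ (c.2 : Int) = (x.2 : Int) + d.2 := by
  rcases h.2 with ⟨h1, h2 | h2⟩ | ⟨h1, h2 | h2⟩
  · exact ⟨((0 : Int), (-1 : Int)), by simp [dirs4], by omega, by omega⟩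
  · exact ⟨((0 : Int), (1 : Int)), by simp [dirs4], by omega, by omega⟩
  · exact ⟨((-1 : Int), (0 : Int)), by simp [dirs4], by omega, by omega⟩
  · exact ⟨((1 : Int), (0 : Int)), by simp [dirs4], by omega, by omega⟩

lemma adjc_symm (g : List (List Int)) {c e : Nat × Nat} (hc : InB g c) (h : Adjc g c e) :
    Adjc g e c := by
  refine ⟨hc, ?_⟩
  rcases h.2 with ⟨h1, h2⟩ | ⟨h1, h2⟩
  · exact Or.inl ⟨h1.symm, h2.symm⟩
  · exact Or.inr ⟨h1.symm, h2.symm⟩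

lemma reach_anti {g : List (List Int)} {V W : List (List Bool)} {x c : Nat × Nat}
    (hsub : subV V W) (h : Reach g W x c) : Reach g V x c :=
  Relation.ReflTransGen.mono (fun _ _ hab => ⟨hab.1, subV_false hsub hab.2⟩) h

lemma reach_mem {g : List (List Int)} {V v' : List (List Bool)} {x : Nat × Nat}
    (hx : vget v' x.1 x.2 = true) (hxV : vget V x.1 x.2 = false)
    (hcl : ∀ c e : Nat × Nat, vget v' c.1 c.2 = true → vget V c.1 c.2 = false →
      Elig g c e → vget v' e.1 e.2 = true) :
    ∀ c, Reach g V x c → vget v' c.1 c.2 = true := by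
  intro c h
  have H : vget v' c.1 c.2 = true ∧ vget V c.1 c.2 = false := by
    induction h with
    | refl => exact ⟨hx, hxV⟩
    | tail _ hbc ih => exact ⟨hcl _ _ ih.1 ih.2 hbc.1, hbc.2⟩
  exact H.1

-- what A's dfs from (i,j) guarantees, relative to its entry visited V
def Post (g : List (List Int)) (V : List (List Bool)) (x : Nat × Nat)
    (r : List (List Bool) × Int) : Prop :=
  ShapeV r.1 g.length (g.headD []).length ∧
  subV (vset V x.1 x.2) r.1 ∧
  (∀ c : Nat × Nat, vget r.1 c.1 c.2 = true → vget V c.1 c.2 = false → Reach g V x c) ∧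
  (∀ c e : Nat × Nat, vget r.1 c.1 c.2 = true → vget V c.1 c.2 = false →
    Elig g c e → vget r.1 e.1 e.2 = true) ∧
  r.2 + (cF r.1 : Int) = (cF V : Int)

-- loop invariant of A's direction loop
def GoInv (g : List (List Int)) (V : List (List Bool)) (i j : Nat)
    (st : List (List Bool) × Int) : Prop :=
  ShapeV st.1 g.length (g.headD []).length ∧
  subV (vset V i j) st.1 ∧
  (∀ c : Nat × Nat, vget st.1 c.1 c.2 = true → vget V c.1 c.2 = false → Reach g V (i, j) c) ∧
  (∀ c e : Nat × Nat, vget st.1 c.1 c.2 = true → vget V c.1 c.2 = false → c ≠ (i, j) →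
    Elig g c e → vget st.1 e.1 e.2 = true) ∧
  st.2 + (cF st.1 : Int) = (cF V : Int)

lemma dfsGo_post (grid : List (List Int)) (fuel : Nat)
    (IH : ∀ (W : List (List Bool)) (a b : Nat),
      ShapeV W grid.length (grid.headD []).length →
      a < grid.length → b < (grid.headD []).length →
      vget W a b = false → cF W ≤ fuel →
      Post grid W (a, b) (dfsA grid fuel a b W))
    (V : List (List Bool)) (i j : Nat)
    (hsh : ShapeV V grid.length (grid.headD []).length)
    (hi : i < grid.length) (hj : j < (grid.headD []).length)
    (hV : vget V i j = false) (hfuel : cF V ≤ fuel + 1) :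
    ∀ (ds : List (Int × Int)), (∀ d ∈ ds, d ∈ dirs4) →
    ∀ (st : List (List Bool) × Int), GoInv grid V i j st →
      GoInv grid V i j (ds.foldl (dfsStep grid (dfsA grid fuel) i j) st) ∧
      subV st.1 (ds.foldl (dfsStep grid (dfsA grid fuel) i j) st).1 ∧
      (∀ d ∈ ds, ∀ c : Nat × Nat, (c.1 : Int) = (i : Int) + d.1 → (c.2 : Int) = (j : Int) + d.2 →
        Elig grid (i, j) c →
        vget (ds.foldl (dfsStep grid (dfsA grid fuel) i j) st).1 c.1 c.2 = true) := by
  intro ds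
  induction ds with
  | nil =>
    intro _ st hinv
    exact ⟨hinv, subV_refl _, by simp⟩
  | cons d ds ihds =>
    intro hds st hinv
    have hd : d ∈ dirs4 := hds d (List.mem_cons_self ..)
    obtain ⟨hshst, hsub0, hsound, hclosedX, hcount⟩ := hinv
    have hsubVst : subV V st.1 := subV_trans (subV_vset V i j) hsub0
    -- one step
    have hstep : GoInv grid V i j (dfsStep grid (dfsA grid fuel) i j st d) ∧
        subV st.1 (dfsStep grid (dfsA grid fuel) i j st d).1 ∧
        (∀ c : Nat × Nat, (c.1 : Int) = (i : Int) + d.1 → (c.2 : Int) = (j : Int) + d.2 →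
          Elig grid (i, j) c →
          vget (dfsStep grid (dfsA grid fuel) i j st d).1 c.1 c.2 = true) := by
      by_cases hb : 0 ≤ (i : Int) + d.1 ∧ (i : Int) + d.1 < (grid.length : Int) ∧
          0 ≤ (j : Int) + d.2 ∧ (j : Int) + d.2 < ((grid.headD []).length : Int)
      · have hbx : ((i : Int) + d.1).toNat < grid.length := by omega
        have hby : ((j : Int) + d.2).toNat < (grid.headD []).length := by omega
        by_cases hc : vget st.1 ((i : Int) + d.1).toNat ((j : Int) + d.2).toNat = false ∧
            (gget grid ((i : Int) + d.1).toNat ((j : Int) + d.2).toNat - gget grid i j).natAbs ≤ 1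
        · -- recursive call fires
          have hcf1 : cF (vset V i j) + 1 = cF V :=
            cF_vset V i j (hsh.1 ▸ hi) hV (by rw [hsh.2 i hi]; exact hj)
          have hcfst : cF st.1 ≤ cF (vset V i j) := by
            have := cF_vset
            -- monotone count via subV; proved below as cF_mono
            exact cF_mono grid.length (vset V i j) st.1 (grid.headD []).length
              (shape_vset hsh i j) hshst hsub0
          have hrec := IH st.1 ((i : Int) + d.1).toNat ((j : Int) + d.2).toNat hshst hbx hby
            hc.1 (by omega)
          obtain ⟨hshp, hsubp, hsoundp, hclosedp, hcountp⟩ := hrec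
          have hres : dfsStep grid (dfsA grid fuel) i j st d =
              ((dfsA grid fuel ((i : Int) + d.1).toNat ((j : Int) + d.2).toNat st.1).1,
               st.2 + (dfsA grid fuel ((i : Int) + d.1).toNat ((j : Int) + d.2).toNat st.1).2) := by
            simp only [dfsStep]
            rw [if_pos hb, if_pos hc]
          rw [hres]
          set p := dfsA grid fuel ((i : Int) + d.1).toNat ((j : Int) + d.2).toNat st.1 with hp
          have hmonop : subV st.1 p.1 :=
            subV_trans (subV_vset st.1 _ _) hsubp
          have hadj : Adjc grid (i, j) (((i : Int) + d.1).toNat, ((j : Int) + d.2).toNat) :=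
            adj_of_dir grid hd i j hb.1 hb.2.1 hb.2.2.1 hb.2.2.2
          have hstep0 : StepR grid V (i, j) (((i : Int) + d.1).toNat, ((j : Int) + d.2).toNat) :=
            ⟨⟨hadj, hc.2⟩, subV_false hsubVst hc.1⟩
          refine ⟨⟨hshp, subV_trans hsub0 hmonop, ?_, ?_, ?_⟩, hmonop, ?_⟩
          · intro c hc1 hcV
            by_cases hcs : vget st.1 c.1 c.2 = true
            · exact hsound c hcs hcV
            · have hcs' : vget st.1 c.1 c.2 = false := by
                cases h : vget st.1 c.1 c.2
                · rfl
                · exact absurd h hcs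
              exact Relation.ReflTransGen.trans (Relation.ReflTransGen.single hstep0)
                (reach_anti hsubVst (hsoundp c hc1 hcs'))
          · intro c e hc1 hcV hcne helig
            by_cases hcs : vget st.1 c.1 c.2 = true
            · exact hmonop _ _ (hclosedX c e hcs hcV hcne helig)
            · have hcs' : vget st.1 c.1 c.2 = false := by
                cases h : vget st.1 c.1 c.2
                · rfl
                · exact absurd h hcs
              exact hclosedp c e hc1 hcs' helig
          · show st.2 + p.2 + (cF p.1 : Int) = (cF V : Int)
            omega
          · rintro ⟨c1, c2⟩ hcx hcy helig
            simp only at hcx hcy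
            have e1 : c1 = ((i : Int) + d.1).toNat := by omega
            have e2 : c2 = ((j : Int) + d.2).toNat := by omega
            subst e1; subst e2
            exact hsubp _ _ (vget_vset_self hshst hbx hby)
        · have hres : dfsStep grid (dfsA grid fuel) i j st d = st := by
            simp only [dfsStep]
            rw [if_pos hb, if_neg hc]
          rw [hres]
          refine ⟨⟨hshst, hsub0, hsound, hclosedX, hcount⟩, subV_refl _, ?_⟩
          rintro ⟨c1, c2⟩ hcx hcy helig
          simp only at hcx hcy
          have e1 : c1 = ((i : Int) + d.1).toNat := by omega
          have e2 : c2 = ((j : Int) + d.2).toNat := by omega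
          subst e1; subst e2
          rcases Decidable.not_and_iff_not_or_not.mp hc with hv | hdif
          · cases hvv : vget st.1 (((i : Int) + d.1).toNat) (((j : Int) + d.2).toNat)
            · exact absurd hvv hv
            · rfl
          · exact absurd helig.2 hdif
      · have hres : dfsStep grid (dfsA grid fuel) i j st d = st := by
          simp only [dfsStep]
          rw [if_neg hb]
        rw [hres]
        refine ⟨⟨hshst, hsub0, hsound, hclosedX, hcount⟩, subV_refl _, ?_⟩
        rintro ⟨c1, c2⟩ hcx hcy helig
        simp only at hcx hcy
        have h1 := helig.1.1.1
        have h2 := helig.1.1.2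
        simp only at h1 h2
        exact absurd ⟨by omega, by omega, by omega, by omega⟩ hb
    -- fold the rest
    obtain ⟨hinv1, hmono1, hper1⟩ := hstep
    have hrest := ihds (fun e he => hds e (List.mem_cons_of_mem d he)) _ hinv1
    obtain ⟨hinv2, hmono2, hper2⟩ := hrest
    rw [List.foldl_cons]
    refine ⟨hinv2, subV_trans hmono1 hmono2, ?_⟩
    intro e he c hcx hcy helig
    rcases List.mem_cons.mp he with rfl | he'
    · exact hmono2 _ _ (hper1 c hcx hcy helig)
    · exact hper2 e he' c hcx hcy helig

lemma dfsA_post (grid : List (List Int)) :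
    ∀ (fuel : Nat) (V : List (List Bool)) (i j : Nat),
      ShapeV V grid.length (grid.headD []).length →
      i < grid.length → j < (grid.headD []).length →
      vget V i j = false → cF V ≤ fuel →
      Post grid V (i, j) (dfsA grid fuel i j V) := by
  intro fuel
  induction fuel with
  | zero =>
    intro V i j hsh hi hj hV hfuel
    have := cF_pos V i j (hsh.1 ▸ hi) hV (by rw [hsh.2 i hi]; exact hj)
    omega
  | succ fuel ih =>
    intro V i j hsh hi hj hV hfuel
    have hinit : GoInv grid V i j (vset V i j, 1) := by
      refine ⟨shape_vset hsh i j, subV_refl _, ?_, ?_, ?_⟩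
      · rintro ⟨c1, c2⟩ hc1 hcV
        rw [vget_vset' hsh hi hj] at hc1
        by_cases hcc : c1 = i ∧ c2 = j
        · rw [hcc.1, hcc.2]
          exact Relation.ReflTransGen.refl
        · rw [if_neg hcc] at hc1
          simp only at hcV
          rw [hcV] at hc1
          exact absurd hc1 (by simp)
      · rintro ⟨c1, c2⟩ e hc1 hcV hcne _
        rw [vget_vset' hsh hi hj] at hc1
        by_cases hcc : c1 = i ∧ c2 = j
        · exact absurd (by rw [hcc.1, hcc.2]) hcne
        · rw [if_neg hcc] at hc1
          simp only at hcV
          rw [hcV] at hc1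
          exact absurd hc1 (by simp)
      · have hcf1 : cF (vset V i j) + 1 = cF V :=
          cF_vset V i j (hsh.1 ▸ hi) hV (by rw [hsh.2 i hi]; exact hj)
        show (1 : Int) + (cF (vset V i j) : Int) = (cF V : Int)
        omega
    have hgo := dfsGo_post grid fuel ih V i j hsh hi hj hV hfuel dirs4
      (fun _ hd => hd) (vset V i j, 1) hinit
    obtain ⟨⟨hsh2, hsub2, hsound2, hclosed2, hcount2⟩, hmono2, hper2⟩ := hgo
    have hEq : dfsA grid (fuel + 1) i j V =
        dirs4.foldl (dfsStep grid (dfsA grid fuel) i j) (vset V i j, 1) := rfl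
    rw [hEq]
    refine ⟨hsh2, hsub2, hsound2, ?_, hcount2⟩
    intro c e hc1 hcV helig
    by_cases hcx : c = (i, j)
    · subst hcx
      obtain ⟨d, hd, hdx, hdy⟩ := dir_of_adj grid _ _ helig.1
      exact hper2 d hd e hdx hdy helig
    · exact hclosed2 c e hc1 hcV hcx helig

-- B-side: invariant of the saturation state (component list comp, visited matrix v)
def SInv (grid : List (List Int)) (V : List (List Bool)) (x0 : Nat × Nat)
    (comp : List (Nat × Nat)) (v : List (List Bool)) : Prop :=
  ShapeV v grid.length (grid.headD []).length ∧
  x0 ∈ comp ∧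
  (∀ c : Nat × Nat, vget v c.1 c.2 = true ↔ (vget V c.1 c.2 = true ∨ c ∈ comp)) ∧
  (∀ c ∈ comp, c.1 < grid.length ∧ c.2 < (grid.headD []).length ∧
    vget V c.1 c.2 = false ∧ Reach grid V x0 c) ∧
  comp.length + cF v = cF V

lemma adjc_of_offset (g : List (List Int)) {d : Int × Int} (hd : d ∈ dirs4)
    (x y a b : Nat) (hx : x < g.length) (hy : y < (g.headD []).length)
    (ha : (a : Int) = (x : Int) + d.1) (hb : (b : Int) = (y : Int) + d.2) :
    Adjc g (a, b) (x, y) := by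
  simp only [dirs4, List.mem_cons, List.not_mem_nil, or_false] at hd
  rcases hd with rfl | rfl | rfl | rfl <;>
    · simp only [Adjc, InB] at *
      omega

lemma addable_reach (grid : List (List Int)) (V : List (List Bool)) (x0 : Nat × Nat)
    (comp : List (Nat × Nat)) (x y : Nat)
    (hx : x < grid.length) (hy : y < (grid.headD []).length)
    (hmem : ∀ c ∈ comp, c.1 < grid.length ∧ c.2 < (grid.headD []).length ∧
      vget V c.1 c.2 = false ∧ Reach grid V x0 c)
    (hVxy : vget V x y = false)
    (ha : addable grid comp x y = true) : Reach grid V x0 (x, y) := by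
  simp only [addable, List.any_eq_true, Bool.and_eq_true, decide_eq_true_iff] at ha
  obtain ⟨d, hd, ⟨hb, hm⟩, hab⟩ := ha
  obtain ⟨h1, h2, h3, h4⟩ := hmem _ hm
  have hc1 : ((((x : Int) + d.1).toNat : Nat) : Int) = (x : Int) + d.1 := by omega
  have hc2 : ((((y : Int) + d.2).toNat : Nat) : Int) = (y : Int) + d.2 := by omega
  refine Relation.ReflTransGen.tail h4 ⟨⟨?_, hab⟩, hVxy⟩
  exact adjc_of_offset grid hd x y _ _ hx hy hc1 hc2

lemma addable_of_elig (grid : List (List Int)) (comp : List (Nat × Nat)) {c e : Nat × Nat}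
    (hc : c ∈ comp) (hcb : c.1 < grid.length ∧ c.2 < (grid.headD []).length)
    (helig : Elig grid c e) : addable grid comp e.1 e.2 = true := by
  obtain ⟨d, hd, hdx, hdy⟩ := dir_of_adj grid e c (adjc_symm grid ⟨hcb.1, hcb.2⟩ helig.1)
  simp only [addable, List.any_eq_true, Bool.and_eq_true, decide_eq_true_iff]
  refine ⟨d, hd, ⟨⟨by omega, by omega, by omega, by omega⟩, ?_⟩, ?_⟩
  · have e1 : ((e.1 : Int) + d.1).toNat = c.1 := by omega
    have e2 : ((e.2 : Int) + d.2).toNat = c.2 := by omega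
    rw [e1, e2]
    exact hc
  · have e1 : ((e.1 : Int) + d.1).toNat = c.1 := by omega
    have e2 : ((e.2 : Int) + d.2).toNat = c.2 := by omega
    rw [e1, e2]
    exact helig.2

lemma sweepCell_inv (grid : List (List Int)) (V : List (List Bool)) (x0 : Nat × Nat)
    (st : List (Nat × Nat) × List (List Bool) × Bool) (x y : Nat)
    (hx : x < grid.length) (hy : y < (grid.headD []).length)
    (hinv : SInv grid V x0 st.1 st.2.1) :
    SInv grid V x0 (sweepCell grid st x y).1 (sweepCell grid st x y).2.1 ∧
    subV st.2.1 (sweepCell grid st x y).2.1 ∧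
    st.1.length ≤ (sweepCell grid st x y).1.length ∧
    (st.2.2 = true → (sweepCell grid st x y).2.2 = true) ∧
    ((sweepCell grid st x y).2.2 = false →
      sweepCell grid st x y = st ∧
      ¬ (vget st.2.1 x y = false ∧ addable grid st.1 x y = true)) := by
  obtain ⟨hsh, hx0, hiff, hmem, hcnt⟩ := hinv
  by_cases hcond : vget st.2.1 x y = false ∧ addable grid st.1 x y = true
  · have hres : sweepCell grid st x y = ((x, y) :: st.1, vset st.2.1 x y, true) := by
      simp only [sweepCell]
      rw [if_pos hcond]
    rw [hres]
    have hVxy : vget V x y = false := by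
      cases hvv : vget V x y
      · rfl
      · have : vget st.2.1 x y = true := (hiff (x, y)).mpr (Or.inl hvv)
        rw [hcond.1] at this
        exact absurd this (by simp)
    have hreach : Reach grid V x0 (x, y) :=
      addable_reach grid V x0 st.1 x y hx hy hmem hVxy hcond.2
    refine ⟨⟨shape_vset hsh x y, List.mem_cons_of_mem _ hx0, ?_, ?_, ?_⟩,
      subV_vset _ _ _, by simp, fun _ => rfl, by simp⟩
    · rintro ⟨c1, c2⟩
      rw [vget_vset' hsh hx hy]
      by_cases hcc : c1 = x ∧ c2 = y
      · obtain ⟨rfl, rfl⟩ := hcc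
        simp
      · rw [if_neg hcc]
        rw [hiff (c1, c2)]
        constructor
        · rintro (h | h)
          · exact Or.inl h
          · exact Or.inr (List.mem_cons_of_mem _ h)
        · rintro (h | h)
          · exact Or.inl h
          · rcases List.mem_cons.mp h with h' | h'
            · exact absurd (Prod.mk.injEq .. ▸ h') (by simpa using hcc)
            · exact Or.inr h'
    · intro c hcmem
      rcases List.mem_cons.mp hcmem with rfl | h'
      · exact ⟨hx, hy, hVxy, hreach⟩
      · exact hmem c h'
    · have hcf : cF (vset st.2.1 x y) + 1 = cF st.2.1 :=
        cF_vset st.2.1 x y (hsh.1 ▸ hx) hcond.1 (by rw [hsh.2 x hx]; exact hy)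
      simp only [List.length_cons]
      omega
  · have hres : sweepCell grid st x y = st := by
      simp only [sweepCell]
      rw [if_neg hcond]
    rw [hres]
    exact ⟨⟨hsh, hx0, hiff, hmem, hcnt⟩, subV_refl _, le_refl _, fun h => h,
      fun _ => ⟨rfl, hcond⟩⟩

-- the flat list of all grid cells, and the nested range-foldl rewritten over it
def cellsOf (grid : List (List Int)) : List (Nat × Nat) :=
  (List.range grid.length).flatMap
    (fun x => (List.range (grid.headD []).length).map (fun y => (x, y)))

lemma mem_cellsOf (grid : List (List Int)) (a b : Nat) :
    (a, b) ∈ cellsOf grid ↔ a < grid.length ∧ b < (grid.headD []).length := by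
  simp [cellsOf, List.mem_flatMap, List.mem_map, List.mem_range]

lemma foldl_nested {β : Type} (f : β → Nat → Nat → β) :
    ∀ (xs : List Nat) (n : Nat) (init : β),
      xs.foldl (fun st x => (List.range n).foldl (fun st y => f st x y) st) init =
      (xs.flatMap (fun x => (List.range n).map (fun y => (x, y)))).foldl
        (fun st c => f st c.1 c.2) init := by
  intro xs
  induction xs with
  | nil => intro n init; rfl
  | cons x xs ih =>
    intro n init
    rw [List.foldl_cons, List.flatMap_cons, List.foldl_append, List.foldl_map, ih]

lemma sweep_go (grid : List (List Int)) (V : List (List Bool)) (x0 : Nat × Nat) :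
    ∀ (cells : List (Nat × Nat)),
      (∀ c ∈ cells, c.1 < grid.length ∧ c.2 < (grid.headD []).length) →
      ∀ (st : List (Nat × Nat) × List (List Bool) × Bool), SInv grid V x0 st.1 st.2.1 →
      SInv grid V x0 (cells.foldl (fun s c => sweepCell grid s c.1 c.2) st).1
        (cells.foldl (fun s c => sweepCell grid s c.1 c.2) st).2.1 ∧
      subV st.2.1 (cells.foldl (fun s c => sweepCell grid s c.1 c.2) st).2.1 ∧
      st.1.length ≤ (cells.foldl (fun s c => sweepCell grid s c.1 c.2) st).1.length ∧
      (st.2.2 = true → (cells.foldl (fun s c => sweepCell grid s c.1 c.2) st).2.2 = true) ∧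
      ((cells.foldl (fun s c => sweepCell grid s c.1 c.2) st).2.2 = true →
        st.2.2 = true ∨ st.1.length < (cells.foldl (fun s c => sweepCell grid s c.1 c.2) st).1.length) ∧
      ((cells.foldl (fun s c => sweepCell grid s c.1 c.2) st).2.2 = false →
        (cells.foldl (fun s c => sweepCell grid s c.1 c.2) st) = st ∧
        ∀ c ∈ cells, ¬ (vget st.2.1 c.1 c.2 = false ∧ addable grid st.1 c.1 c.2 = true)) := by
  intro cells
  induction cells with
  | nil =>
    intro _ st hinv
    exact ⟨hinv, subV_refl _, le_refl _, fun h => h, fun h => Or.inl h, fun _ => ⟨rfl, by simp⟩⟩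
  | cons c cells ih =>
    intro hb st hinv
    obtain ⟨hc1, hc2⟩ := hb c (List.mem_cons_self ..)
    have hstep := sweepCell_inv grid V x0 st c.1 c.2 hc1 hc2 hinv
    obtain ⟨hinv1, hsub1, hlen1, hmono1, hfalse1⟩ := hstep
    have hrest := ih (fun e he => hb e (List.mem_cons_of_mem _ he)) _ hinv1
    obtain ⟨hinv2, hsub2, hlen2, hmono2, hgrew2, hfalse2⟩ := hrest
    rw [List.foldl_cons]
    refine ⟨hinv2, subV_trans hsub1 hsub2, le_trans hlen1 hlen2, ?_, ?_, ?_⟩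
    · intro h
      exact hmono2 (hmono1 h)
    · intro h
      rcases hgrew2 h with h' | h'
      · -- sweepCell changed flag true: either input was true, or an add happened
        by_cases hin : st.2.2 = true
        · exact Or.inl hin
        · -- then the single step must itself have changed: it added a cell
          by_cases hcond : vget st.2.1 c.1 c.2 = false ∧ addable grid st.1 c.1 c.2 = true
          · have : sweepCell grid st c.1 c.2 = ((c.1, c.2) :: st.1, vset st.2.1 c.1 c.2, true) := by
              simp only [sweepCell]; rw [if_pos hcond]
            refine Or.inr (lt_of_lt_of_le ?_ hlen2)
            rw [this]
            simp
          · have : sweepCell grid st c.1 c.2 = st := by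
              simp only [sweepCell]; rw [if_neg hcond]
            rw [this] at h'
            cases hvv : st.2.2
            · rw [hvv] at h'; exact absurd h' (by simp)
            · exact Or.inl rfl
      · exact Or.inr (lt_of_le_of_lt hlen1 h')
    · intro h
      obtain ⟨heq2, hnone2⟩ := hfalse2 h
      have hflag1 : (sweepCell grid st c.1 c.2).2.2 = false := by
        rw [heq2] at h; exact h
      obtain ⟨heq1, hnone1⟩ := hfalse1 hflag1
      rw [heq2, heq1]
      refine ⟨rfl, ?_⟩
      intro e he
      rcases List.mem_cons.mp he with rfl | he'
      · exact hnone1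
      · have := hnone2 e he'
        rw [heq1] at this
        exact this

lemma saturate_post (grid : List (List Int)) (V : List (List Bool)) (x0 : Nat × Nat) :
    ∀ (fuel : Nat) (comp : List (Nat × Nat)) (v : List (List Bool)),
      SInv grid V x0 comp v → cF v < fuel →
      SInv grid V x0 (saturate grid fuel comp v).1 (saturate grid fuel comp v).2 ∧
      (∀ c ∈ (saturate grid fuel comp v).1, ∀ e : Nat × Nat, Elig grid c e →
        vget (saturate grid fuel comp v).2 e.1 e.2 = true) := by
  intro fuel
  induction fuel with
  | zero =>
    intro comp v _ hf
    omega
  | succ fuel ih =>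
    intro comp v hinv hf
    have hsw : sweepB grid comp v =
        (cellsOf grid).foldl (fun s c => sweepCell grid s c.1 c.2) (comp, v, false) := by
      unfold sweepB cellsOf
      rw [foldl_nested (sweepCell grid) (List.range grid.length) (grid.headD []).length
        (comp, v, false)]
    have hEq : saturate grid (fuel + 1) comp v =
        (if ((cellsOf grid).foldl (fun s c => sweepCell grid s c.1 c.2) (comp, v, false)).2.2 then
          saturate grid fuel
            ((cellsOf grid).foldl (fun s c => sweepCell grid s c.1 c.2) (comp, v, false)).1
            ((cellsOf grid).foldl (fun s c => sweepCell grid s c.1 c.2) (comp, v, false)).2.1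
        else
          (((cellsOf grid).foldl (fun s c => sweepCell grid s c.1 c.2) (comp, v, false)).1,
           ((cellsOf grid).foldl (fun s c => sweepCell grid s c.1 c.2) (comp, v, false)).2.1)) := by
      rw [saturate, hsw]
    have hbnds : ∀ c ∈ cellsOf grid, c.1 < grid.length ∧ c.2 < (grid.headD []).length := by
      rintro ⟨a, b⟩ hc
      exact (mem_cellsOf grid a b).mp hc
    have hgo := sweep_go grid V x0 (cellsOf grid) hbnds (comp, v, false) hinv
    set st' := (cellsOf grid).foldl (fun s c => sweepCell grid s c.1 c.2) (comp, v, false) with hst'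
    obtain ⟨hinv', hsub', hlen', _, hgrew', hfalse'⟩ := hgo
    rw [hEq]
    by_cases hch : st'.2.2 = true
    · rw [if_pos hch]
      have hgrow : comp.length < st'.1.length := by
        rcases hgrew' hch with h | h
        · exact absurd h (by simp)
        · exact h
      have hcnt := hinv'.2.2.2.2
      have hcnt0 := hinv.2.2.2.2
      exact ih st'.1 st'.2.1 hinv' (by omega)
    · rw [if_neg hch]
      have hch' : st'.2.2 = false := by
        cases h : st'.2.2
        · rfl
        · exact absurd h hch
      obtain ⟨heq, hnone⟩ := hfalse' hch'
      refine ⟨by rw [heq]; exact hinv, ?_⟩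
      intro c hcmem e helig
      rw [heq] at hcmem ⊢
      obtain ⟨hcb1, hcb2, _, _⟩ := hinv.2.2.2.1 c hcmem
      have heb : InB grid e := helig.1.1
      have hadd : addable grid comp e.1 e.2 = true :=
        addable_of_elig grid comp hcmem ⟨hcb1, hcb2⟩ helig
      have := hnone (e.1, e.2) ((mem_cellsOf grid e.1 e.2).mpr ⟨heb.1, heb.2⟩)
      simp only at this
      cases hv : vget v e.1 e.2
      · exact absurd ⟨hv, hadd⟩ this
      · rfl

-- one start cell: B's saturation produces the same visited matrix as A's dfs,
-- and the component size equals A's area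
lemma cell_eqB (grid : List (List Int)) (V : List (List Bool)) (i j : Nat)
    (hsh : ShapeV V grid.length (grid.headD []).length)
    (hi : i < grid.length) (hj : j < (grid.headD []).length)
    (hV : vget V i j = false) :
    (saturate grid (grid.length * (grid.headD []).length + 1) [(i, j)] (vset V i j)).2 =
      (dfsA grid (grid.length * (grid.headD []).length + 1) i j V).1 ∧
    (((saturate grid (grid.length * (grid.headD []).length + 1) [(i, j)] (vset V i j)).1.length : Int)) =
      (dfsA grid (grid.length * (grid.headD []).length + 1) i j V).2 := by
  have hle : cF V ≤ grid.length * (grid.headD []).length :=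
    cF_le grid.length V (grid.headD []).length hsh
  have hcf1 : cF (vset V i j) + 1 = cF V :=
    cF_vset V i j (hsh.1 ▸ hi) hV (by rw [hsh.2 i hi]; exact hj)
  -- A side
  obtain ⟨hshA, hsubA, hsoundA, hclosedA, hcountA⟩ :=
    dfsA_post grid (grid.length * (grid.headD []).length + 1) V i j hsh hi hj hV (by omega)
  -- B side: initial invariant
  have hinit : SInv grid V (i, j) [(i, j)] (vset V i j) := by
    refine ⟨shape_vset hsh i j, List.mem_cons_self .., ?_, ?_, ?_⟩
    · rintro ⟨c1, c2⟩
      rw [vget_vset' hsh hi hj]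
      by_cases hcc : c1 = i ∧ c2 = j
      · obtain ⟨rfl, rfl⟩ := hcc
        simp
      · rw [if_neg hcc]
        constructor
        · intro h
          exact Or.inl h
        · rintro (h | h)
          · exact h
          · rcases List.mem_cons.mp h with h' | h'
            · exact absurd (Prod.mk.injEq .. ▸ h') (by simpa using hcc)
            · exact absurd h' (by simp)
    · intro c hc
      rcases List.mem_cons.mp hc with rfl | h'
      · exact ⟨hi, hj, hV, Relation.ReflTransGen.refl⟩
      · exact absurd h' (by simp)
    · simp only [List.length_cons, List.length_nil]
      omega
  obtain ⟨hinvF, hclosedF⟩ :=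
    saturate_post grid V (i, j) (grid.length * (grid.headD []).length + 1) [(i, j)]
      (vset V i j) hinit (by omega)
  obtain ⟨hshB, hx0B, hiffB0, hmemB, hcntB⟩ := hinvF
  set p := saturate grid (grid.length * (grid.headD []).length + 1) [(i, j)] (vset V i j)
  set q := dfsA grid (grid.length * (grid.headD []).length + 1) i j V
  have hVsubA : subV V q.1 := subV_trans (subV_vset V i j) hsubA
  have hxA : vget q.1 i j = true := hsubA _ _ (vget_vset_self hsh hi hj)
  have hxB : vget p.2 i j = true := (hiffB0 (i, j)).mpr (Or.inr hx0B)
  -- characterisation of both matrices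
  have hiffA : ∀ c : Nat × Nat, vget q.1 c.1 c.2 = true ↔
      (vget V c.1 c.2 = true ∨ Reach grid V (i, j) c) := by
    intro c
    constructor
    · intro h
      by_cases hv : vget V c.1 c.2 = true
      · exact Or.inl hv
      · refine Or.inr (hsoundA c h ?_)
        cases hh : vget V c.1 c.2
        · rfl
        · exact absurd hh hv
    · rintro (h | h)
      · exact hVsubA _ _ h
      · exact reach_mem hxA hV hclosedA c h
  have hclB : ∀ c e : Nat × Nat, vget p.2 c.1 c.2 = true → vget V c.1 c.2 = false →
      Elig grid c e → vget p.2 e.1 e.2 = true := by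
    intro c e hc1 hcV helig
    rcases (hiffB0 c).mp hc1 with h | h
    · rw [hcV] at h; exact absurd h (by simp)
    · exact hclosedF c h e helig
  have hiffB : ∀ c : Nat × Nat, vget p.2 c.1 c.2 = true ↔
      (vget V c.1 c.2 = true ∨ Reach grid V (i, j) c) := by
    intro c
    constructor
    · intro h
      rcases (hiffB0 c).mp h with h' | h'
      · exact Or.inl h'
      · exact Or.inr (hmemB c h').2.2.2
    · rintro (h | h)
      · exact (hiffB0 c).mpr (Or.inl h)
      · exact reach_mem hxB hV hclB c h
  have heq1 : p.2 = q.1 := by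
    apply ext2 grid.length _ _ (grid.headD []).length hshB hshA
    intro a b _ _
    cases h1 : vget p.2 a b
    · cases h2 : vget q.1 a b
      · rfl
      · exact absurd ((hiffB (a, b)).mpr ((hiffA (a, b)).mp h2)) (by rw [h1]; simp)
    · exact ((hiffA (a, b)).mpr ((hiffB (a, b)).mp h1)).symm
  refine ⟨heq1, ?_⟩
  rw [heq1] at hcntB
  omega

lemma foldl_congr_inv {α β : Type} (P : β → Prop) (f g : β → α → β) :
    ∀ (l : List α) (init : β), P init →
      (∀ s a, a ∈ l → P s → f s a = g s a ∧ P (f s a)) →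
      l.foldl f init = l.foldl g init ∧ P (l.foldl f init) := by
  intro l
  induction l with
  | nil => intro init hP _; exact ⟨rfl, hP⟩
  | cons a t ih =>
    intro init hP h
    have h0 := h init a (List.mem_cons_self ..) hP
    rw [List.foldl_cons, List.foldl_cons, ← h0.1]
    exact ih (f init a) h0.2 (fun s b hb hs => h s b (List.mem_cons_of_mem _ hb) hs)

lemma max_eq_ite (a b : Int) : max a b = if a < b then b else a := by
  by_cases h : a < b
  · rw [if_pos h, max_eq_right h.le]
  · rw [if_neg h, max_eq_left (not_lt.mp h)]

lemma shape_replicate (m n : Nat) :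
    ShapeV (List.replicate m (List.replicate n false)) m n := by
  refine ⟨List.length_replicate, ?_⟩
  intro k hk
  rw [List.getElem?_replicate]
  simp [hk]

-- ===== VERDICT (by name: the statement is the Claim_ definition above) =====
theorem max_grid_area_spec : Claim_equal_max_grid_area := by
  intro grid _ _
  show max_grid_area grid = max_grid_area_alt grid
  simp only [max_grid_area, max_grid_area_alt]
  have hmain := foldl_congr_inv
    (fun st : List (List Bool) × Int => ShapeV st.1 grid.length (grid.headD []).length)
    (fun st i => (List.range (grid.headD []).length).foldl
      (fun (st : List (List Bool) × Int) j =>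
        if vget st.1 i j = false then
          let p := dfsA grid (grid.length * (grid.headD []).length + 1) i j st.1
          (p.1, max st.2 p.2)
        else st) st)
    (fun st i => (List.range (grid.headD []).length).foldl
      (fun (st : List (List Bool) × Int) j =>
        if vget st.1 i j = false then
          let p := saturate grid (grid.length * (grid.headD []).length + 1) [(i, j)]
            (vset st.1 i j)
          (p.2, if st.2 < (p.1.length : Int) then (p.1.length : Int) else st.2)
        else st) st)
    (List.range grid.length)
    (List.replicate grid.length (List.replicate (grid.headD []).length false), 0)
    (shape_replicate grid.length (grid.headD []).length)
    (by
      intro st i hi hP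
      have hi' : i < grid.length := List.mem_range.mp hi
      have hinner := foldl_congr_inv
        (fun st : List (List Bool) × Int => ShapeV st.1 grid.length (grid.headD []).length)
        (fun (st : List (List Bool) × Int) j =>
          if vget st.1 i j = false then
            let p := dfsA grid (grid.length * (grid.headD []).length + 1) i j st.1
            (p.1, max st.2 p.2)
          else st)
        (fun (st : List (List Bool) × Int) j =>
          if vget st.1 i j = false then
            let p := saturate grid (grid.length * (grid.headD []).length + 1) [(i, j)]
              (vset st.1 i j)
            (p.2, if st.2 < (p.1.length : Int) then (p.1.length : Int) else st.2)
          else st)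
        (List.range (grid.headD []).length) st hP
        (by
          intro s j hj hPs
          have hj' : j < (grid.headD []).length := List.mem_range.mp hj
          dsimp only
          by_cases hv : vget s.1 i j = false
          · rw [if_pos hv, if_pos hv]
            simp only
            obtain ⟨hm1, hm2⟩ := cell_eqB grid s.1 i j hPs hi' hj' hv
            constructor
            · rw [← hm1, ← hm2, max_eq_ite]
            · exact (dfsA_post grid (grid.length * (grid.headD []).length + 1) s.1 i j hPs
                hi' hj' hv (by
                  have := cF_le grid.length s.1 (grid.headD []).length hPs
                  omega)).1
          · rw [if_neg hv, if_neg hv]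
            exact ⟨rfl, hPs⟩)
      exact hinner)
  rw [hmain.1]
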